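-- pv_equiv track=rewrite | github.com/AbbeySummer/Carroll-Triangle-Problem | efficient_obtuse_counter.py | DNT2
-- ===== SOURCE A (Python) =====
-- import math
--
-- def DNT2(rows,cols):
--     i = 2
--     total = 0
--     while i <= rows:
--         k = 2
--         while k <= cols:
--             s = 2 * (math.gcd(k-1,i-1)-1) * (rows - i + 1) * (cols - k + 1)
--             total += s
--             k+=1
--         i += 1
--     return total
-- ===== SOURCE B (Python) =====
-- import math
--
-- def _phi(d):
--     # Euler's totient by direct coprime count
--     return sum(1 for j in range(1, d + 1) if math.gcd(j, d) == 1)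
--
-- def _wsum(limit, size, d):
--     # sum of (size - a) over multiples a of d with 1 <= a <= limit
--     m = limit // d
--     return m * size - d * m * (m + 1) // 2
--
-- def DNT2(rows, cols):
--     n = min(rows, cols) - 1
--     total = 0
--     for d in range(2, n + 1):
--         total += _phi(d) * _wsum(rows - 1, rows, d) * _wsum(cols - 1, cols, d)
--     return 2 * total
-- ===== Notes on version B (the rewrite author's own statement) =====
-- stated objective: alternative
-- what changed: Replaces the per-cell gcd double loop over the whole grid by the totient identity gcd(a,b)-1 = sum of phi(d) over common divisors d>=2, summing over each divisor d with closed-form weighted sums over its multiples, so only one loop over d = 2..min(rows,cols)-1 remains.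
import Mathlib
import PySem

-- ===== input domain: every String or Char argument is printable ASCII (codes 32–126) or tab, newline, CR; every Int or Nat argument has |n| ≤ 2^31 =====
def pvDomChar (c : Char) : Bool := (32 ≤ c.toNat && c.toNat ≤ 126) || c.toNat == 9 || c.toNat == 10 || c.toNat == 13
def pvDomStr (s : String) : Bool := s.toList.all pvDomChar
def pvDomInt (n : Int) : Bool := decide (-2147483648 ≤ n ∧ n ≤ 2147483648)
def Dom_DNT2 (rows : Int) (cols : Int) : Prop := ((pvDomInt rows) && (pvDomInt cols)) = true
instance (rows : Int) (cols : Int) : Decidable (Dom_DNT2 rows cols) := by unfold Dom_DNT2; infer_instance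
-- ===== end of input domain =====

-- B replaces A's per-cell gcd double loop by grouping the gcd weight through Euler's totient over
-- common divisors d, with a closed-form weighted sum over the multiples of each d, leaving a single loop
-- over d = 2..min(rows,cols)-1 (objective: alternative).

-- ===== PORT A =====
-- inner while loop: 'while k <= cols: total += 2*(gcd(k-1,i-1)-1)*(rows-i+1)*(cols-k+1); k += 1'
def DNT2inner (rows cols i k total : Int) : Int :=
  if k ≤ cols then
    DNT2inner rows cols i (k + 1)
      (total + 2 * ((Int.gcd (k - 1) (i - 1) : Int) - 1) * (rows - i + 1) * (cols - k + 1))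
  else total
termination_by (cols + 1 - k).toNat
decreasing_by omega

-- outer while loop: 'while i <= rows: <inner>; i += 1'
def DNT2outer (rows cols i total : Int) : Int :=
  if i ≤ rows then
    DNT2outer rows cols (i + 1) (DNT2inner rows cols i 2 total)
  else total
termination_by (rows + 1 - i).toNat
decreasing_by omega

def DNT2 (rows : Int) (cols : Int) : Int := DNT2outer rows cols 2 0

-- ===== PORT B =====
-- _phi(d) = sum(1 for j in range(1, d+1) if gcd(j, d) == 1)
def phiB (d : Int) : Int :=
  (((PySem.List.pyRange 1 (d + 1) 1).countP (fun j => Int.gcd j d == 1) : ℕ) : Int)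

-- _wsum(limit, size, d): m = limit // d; return m*size - d*m*(m+1)//2
def wsumB (limit size d : Int) : Int :=
  let m := PySem.Int.floordiv limit d
  m * size - PySem.Int.floordiv (d * m * (m + 1)) 2

def DNT2_alt (rows : Int) (cols : Int) : Int :=
  let n := min rows cols - 1
  let total := (PySem.List.pyRange 2 (n + 1) 1).foldl
    (fun total d => total + phiB d * wsumB (rows - 1) rows d * wsumB (cols - 1) cols d) 0
  2 * total

-- ===== PRECONDITION & SPEC =====
def Spec_DNT2 (rows : Int) (cols : Int) (out : Int) : Prop := out = DNT2_alt rows cols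
instance (rows : Int) (cols : Int) (out : Int) : Decidable (Spec_DNT2 rows cols out) := by unfold Spec_DNT2; infer_instance

-- ===== CLAIM (what is proved, stated in full; the proofs are below) =====
def Claim_equal_DNT2 : Prop := ∀ (rows : Int) (cols : Int), Dom_DNT2 rows cols → Spec_DNT2 rows cols (DNT2 rows cols)

-- ===== LEMMAS AND PROOFS =====

-- the value the inner loop adds for a fixed i (with k = b + 2)
def innerSum (rows cols i : Int) : Int :=
  ∑ b ∈ Finset.range (cols - 1).toNat,
    2 * ((Int.gcd ((b : Int) + 1) (i - 1) : Int) - 1) * (rows - i + 1) * (cols - (b : Int) - 1)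

lemma inner_go (rows cols i : Int) : ∀ (fuel : ℕ) (k total : Int), (cols + 1 - k).toNat = fuel →
    DNT2inner rows cols i k total = total + ∑ b ∈ Finset.range fuel,
      2 * ((Int.gcd (k + (b : Int) - 1) (i - 1) : Int) - 1) * (rows - i + 1) * (cols - (k + (b : Int)) + 1) := by
  intro fuel
  induction fuel with
  | zero =>
    intro k total h
    rw [DNT2inner, if_neg (by omega)]
    simp
  | succ m ih =>
    intro k total h
    have hk : k ≤ cols := by omega
    rw [DNT2inner, if_pos hk, ih (k + 1) _ (by omega)]
    rw [Finset.sum_range_succ']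
    have hsum : ∑ b ∈ Finset.range m, 2 * ((Int.gcd (k + 1 + (b : Int) - 1) (i - 1) : Int) - 1) * (rows - i + 1) * (cols - (k + 1 + (b : Int)) + 1)
        = ∑ b ∈ Finset.range m, 2 * ((Int.gcd (k + ((b : Int) + 1) - 1) (i - 1) : Int) - 1) * (rows - i + 1) * (cols - (k + ((b : Int) + 1)) + 1) := by
      refine Finset.sum_congr rfl (fun b _ => ?_)
      have : k + 1 + (b : Int) = k + ((b : Int) + 1) := by ring
      rw [this]
    push_cast
    rw [hsum]
    have h0 : 2 * ((Int.gcd (k + (0:ℕ) - 1) (i - 1) : Int) - 1) * (rows - i + 1) * (cols - (k + (0:ℕ)) + 1)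
        = 2 * ((Int.gcd (k - 1) (i - 1) : Int) - 1) * (rows - i + 1) * (cols - k + 1) := by
      norm_num
    push_cast at h0 ⊢
    rw [h0]
    ring

lemma inner_eq (rows cols i total : Int) :
    DNT2inner rows cols i 2 total = total + innerSum rows cols i := by
  rw [inner_go rows cols i (cols - 1).toNat 2 total (by omega), innerSum]
  congr 1
  refine Finset.sum_congr rfl (fun b _ => ?_)
  have h1 : (2 : Int) + (b : Int) - 1 = (b : Int) + 1 := by ring
  have h2 : cols - (2 + (b : Int)) + 1 = cols - (b : Int) - 1 := by ring
  rw [h1, h2]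

lemma outer_go (rows cols : Int) : ∀ (fuel : ℕ) (i total : Int), (rows + 1 - i).toNat = fuel →
    DNT2outer rows cols i total = total + ∑ a ∈ Finset.range fuel, innerSum rows cols (i + (a : Int)) := by
  intro fuel
  induction fuel with
  | zero =>
    intro i total h
    rw [DNT2outer, if_neg (by omega)]
    simp
  | succ m ih =>
    intro i total h
    have hi : i ≤ rows := by omega
    rw [DNT2outer, if_pos hi, inner_eq, ih (i + 1) _ (by omega), Finset.sum_range_succ']
    have hsum : ∑ a ∈ Finset.range m, innerSum rows cols (i + 1 + (a : Int))
        = ∑ a ∈ Finset.range m, innerSum rows cols (i + ((a : Int) + 1)) := by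
      refine Finset.sum_congr rfl (fun a _ => ?_)
      have : i + 1 + (a : Int) = i + ((a : Int) + 1) := by ring
      rw [this]
    push_cast
    rw [hsum]
    ring_nf

-- A as a double Finset sum
lemma A_sum (rows cols : Int) :
    DNT2 rows cols = ∑ a ∈ Finset.range (rows - 1).toNat, ∑ b ∈ Finset.range (cols - 1).toNat,
      2 * ((Nat.gcd (b + 1) (a + 1) : Int) - 1) * (rows - (a : Int) - 1) * (cols - (b : Int) - 1) := by
  rw [DNT2, outer_go rows cols (rows - 1).toNat 2 0 (by omega), zero_add]
  refine Finset.sum_congr rfl (fun a _ => ?_)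
  rw [innerSum]
  refine Finset.sum_congr rfl (fun b _ => ?_)
  have h1 : (2 : Int) + (a : Int) - 1 = ((a + 1 : ℕ) : Int) := by push_cast; ring
  have h2 : ((b : Int) + 1) = ((b + 1 : ℕ) : Int) := by push_cast; ring
  have h3 : rows - (2 + (a : Int)) + 1 = rows - (a : Int) - 1 := by ring
  rw [h1, h2, h3, Int.gcd_natCast_natCast]

-- B as a Finset sum over d = j + 2
lemma B_sum (rows cols : Int) :
    DNT2_alt rows cols = ∑ j ∈ Finset.range (min rows cols - 2).toNat,
      2 * (phiB (2 + (j : Int)) * wsumB (rows - 1) rows (2 + (j : Int)) * wsumB (cols - 1) cols (2 + (j : Int))) := by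
  rw [DNT2_alt]
  rw [PySem.List.foldl_add (g := fun d => phiB d * wsumB (rows - 1) rows d * wsumB (cols - 1) cols d)]
  rw [PySem.List.pyRange_one]
  have hN : (min rows cols - 1 + 1 - 2).toNat = (min rows cols - 2).toNat := by omega
  rw [hN, List.map_map]
  have : (((List.range (min rows cols - 2).toNat).map
      ((fun d => phiB d * wsumB (rows - 1) rows d * wsumB (cols - 1) cols d) ∘ fun k : ℕ => (2 : Int) + (k : Int)))).sum
      = ∑ j ∈ Finset.range (min rows cols - 2).toNat,
        (phiB (2 + (j : Int)) * wsumB (rows - 1) rows (2 + (j : Int)) * wsumB (cols - 1) cols (2 + (j : Int))) := rfl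
  rw [this, zero_add, Finset.mul_sum]

lemma card_filter_range (n : ℕ) (p : ℕ → Prop) [DecidablePred p] :
    ((Finset.range n).filter p).card = (List.range n).countP (fun k => decide (p k)) := by
  rw [List.countP_eq_length_filter]
  simp [Finset.card, Finset.filter, Finset.range, Multiset.range]

-- B's coprime count is Euler's totient
lemma phiB_eq (d : ℕ) (hd : 1 ≤ d) : phiB (d : Int) = (Nat.totient d : Int) := by
  rw [phiB]
  congr 1
  rw [PySem.List.pyRange_one]
  have h1 : ((d : Int) + 1 - 1).toNat = d := by omega
  rw [h1, List.countP_map]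
  have h2 : ((fun j => Int.gcd j (d : Int) == 1) ∘ fun k : ℕ => (1 : Int) + (k : Int))
      = fun k : ℕ => Nat.gcd (1 + k) d == 1 := by
    funext k
    simp only [Function.comp]
    have : (1 : Int) + (k : Int) = ((1 + k : ℕ) : Int) := by push_cast; ring
    rw [this, Int.gcd_natCast_natCast]
  rw [h2, Nat.totient_eq_card_coprime, card_filter_range]
  obtain ⟨m, rfl⟩ : ∃ m, d = m + 1 := ⟨d - 1, by omega⟩
  conv_rhs => rw [List.range_succ_eq_map]
  rw [List.range_succ]
  simp only [List.countP_append, List.countP_cons, List.countP_map, List.countP_nil]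
  have hcong : List.countP (fun k : ℕ => Nat.gcd (1 + k) (m + 1) == 1) (List.range m)
      = List.countP ((fun k : ℕ => decide ((m+1).Coprime k)) ∘ Nat.succ) (List.range m) := by
    apply List.countP_congr
    intro k _
    simp only [Function.comp, Nat.Coprime, Nat.succ_eq_add_one]
    rw [Nat.gcd_comm, Nat.add_comm 1 k]
    simp
  rw [hcong]
  have e1 : (Nat.gcd (1 + m) (m + 1) == 1) = decide (m = 0) := by
    rw [Nat.add_comm 1 m, Nat.gcd_self]
    cases m <;> simp
  have e2 : (decide ((m+1).Coprime 0)) = decide (m = 0) := by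
    simp [Nat.Coprime]
  rw [e1, e2]
  omega

-- Gauss's totient identity, restricted to divisors ≥ 2
lemma gcd_sub_one_eq (u v N : ℕ) (hu : 1 ≤ u) (hN : Nat.gcd u v ≤ N + 1) :
    ((Nat.gcd u v : Int) - 1) = ∑ j ∈ Finset.range N,
      (if (j + 2) ∣ u ∧ (j + 2) ∣ v then ((Nat.totient (j + 2) : Int)) else 0) := by
  set g := Nat.gcd u v with hg
  have hg1 : 1 ≤ g := Nat.pos_of_ne_zero (by
    intro h
    exact absurd (Nat.eq_zero_of_gcd_eq_zero_left (hg ▸ h)) (by omega))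
  have hcond : ∀ j : ℕ, ((j + 2) ∣ u ∧ (j + 2) ∣ v) ↔ (j + 2) ∣ g := by
    intro j
    exact (Nat.dvd_gcd_iff).symm
  have hcast : ∑ j ∈ Finset.range N, (if (j + 2) ∣ u ∧ (j + 2) ∣ v then ((Nat.totient (j + 2) : Int)) else 0)
      = ((∑ j ∈ Finset.range N, if (j + 2) ∣ g then Nat.totient (j + 2) else 0 : ℕ) : Int) := by
    push_cast
    refine Finset.sum_congr rfl (fun j _ => ?_)
    simp only [hcond j]
  rw [hcast]
  have hnat : (∑ j ∈ Finset.range N, if (j + 2) ∣ g then Nat.totient (j + 2) else 0) + 1 = g := by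
    have h1 : ∑ j ∈ Finset.range N, (if (j + 2) ∣ g then Nat.totient (j + 2) else 0)
        = ∑ d ∈ Finset.Ico 2 (N + 2), (if d ∣ g then Nat.totient d else 0) := by
      rw [Finset.sum_Ico_eq_sum_range]
      refine Finset.sum_congr (by congr 1) (fun j _ => ?_)
      rw [Nat.add_comm 2 j]
    have h2 : insert 1 (Finset.Ico 2 (N + 2)) = Finset.Ico 1 (N + 2) := by
      ext x
      simp [Finset.mem_Ico, Finset.mem_insert]
      omega
    have h3 : ∑ d ∈ Finset.Ico 1 (N + 2), (if d ∣ g then Nat.totient d else 0)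
        = (if (1:ℕ) ∣ g then Nat.totient 1 else 0) + ∑ d ∈ Finset.Ico 2 (N + 2), (if d ∣ g then Nat.totient d else 0) := by
      rw [← h2, Finset.sum_insert (by simp)]
    have h4 : ∑ d ∈ Finset.Ico 1 (N + 2), (if d ∣ g then Nat.totient d else 0)
        = ∑ d ∈ (Finset.Ico 1 (N + 2)).filter (· ∣ g), Nat.totient d := by
      rw [Finset.sum_filter]
    have h5 : (Finset.Ico 1 (N + 2)).filter (· ∣ g) = g.divisors := by
      ext x
      simp only [Finset.mem_filter, Finset.mem_Ico, Nat.mem_divisors]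
      constructor
      · rintro ⟨_, hx⟩; exact ⟨hx, by omega⟩
      · rintro ⟨hx, _⟩
        refine ⟨⟨Nat.pos_of_dvd_of_pos hx (by omega), ?_⟩, hx⟩
        have := Nat.le_of_dvd (by omega) hx
        omega
    have h6 : ∑ d ∈ g.divisors, Nat.totient d = g := Nat.sum_totient g
    rw [h5] at h4
    simp [Nat.totient_one] at h3
    omega
  omega

-- closed form for the weighted sum over the multiples of d
lemma wsum_eq (size : Int) (P d : ℕ) (hP : (P : Int) = size - 1) (hd : 2 ≤ d) :
    (∑ a ∈ Finset.range P, (if d ∣ (a + 1) then (size - (a : Int) - 1) else 0)) =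
      wsumB (size - 1) size (d : Int) := by
  set m := P / d with hm
  have hrhs : wsumB (size - 1) size (d : Int) = (m : Int) * size - ((d * m * (m + 1) / 2 : ℕ) : Int) := by
    rw [wsumB, ← hP]
    rw [show ((P : Int) = ((P : ℕ) : Int)) from rfl]
    rw [PySem.Int.floordiv_natCast, ← hm]
    have h : ((m : Int) + 1) = ((m + 1 : ℕ) : Int) := by push_cast; ring
    rw [h]
    rw [show ((d : Int) * (m : ℕ) * ((m + 1 : ℕ) : Int)) = ((d * m * (m + 1) : ℕ) : Int) by push_cast; ring]
    rw [show ((2 : Int) = ((2 : ℕ) : Int)) from rfl]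
    rw [PySem.Int.floordiv_natCast]
  rw [hrhs]
  have h1 : (∑ a ∈ Finset.range P, (if d ∣ (a + 1) then (size - (a : Int) - 1) else 0))
      = ∑ c ∈ Finset.Icc 1 P, (if d ∣ c then (size - (c : Int)) else 0) := by
    rw [← Finset.Ico_add_one_right_eq_Icc 1 P, Finset.sum_Ico_eq_sum_range]
    have hPP : P + 1 - 1 = P := by omega
    rw [hPP]
    refine Finset.sum_congr rfl (fun a _ => ?_)
    rw [Nat.add_comm 1 a]
    push_cast
    ring_nf
  rw [h1, ← Finset.sum_filter]
  have himg : (Finset.Icc 1 P).filter (fun c => d ∣ c) = (Finset.Icc 1 m).image (fun j => j * d) := by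
    ext c
    simp only [Finset.mem_filter, Finset.mem_Icc, Finset.mem_image]
    constructor
    · rintro ⟨⟨h1c, hcP⟩, hdc⟩
      refine ⟨c / d, ⟨?_, ?_⟩, Nat.div_mul_cancel hdc⟩
      · have := Nat.le_of_dvd (by omega) hdc
        exact (Nat.one_le_div_iff (by omega)).mpr this
      · exact Nat.div_le_div_right hcP
    · rintro ⟨j, ⟨hj1, hjm⟩, rfl⟩
      have hmd : m * d ≤ P := Nat.div_mul_le_self P d
      refine ⟨⟨by nlinarith, ?_⟩, Dvd.intro_left j rfl⟩
      calc j * d ≤ m * d := Nat.mul_le_mul_right d hjm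
        _ ≤ P := hmd
  rw [himg, Finset.sum_image (by intro j1 _ j2 _ h; exact Nat.eq_of_mul_eq_mul_right (by omega) h)]
  have hexp : ∑ j ∈ Finset.Icc 1 m, (size - ((j * d : ℕ) : Int))
      = (m : Int) * size - (d : Int) * ((∑ j ∈ Finset.Icc 1 m, j : ℕ) : Int) := by
    rw [Finset.sum_sub_distrib]
    congr 1
    · rw [Finset.sum_const, Nat.card_Icc]
      simp [mul_comm]
    · push_cast [Finset.mul_sum]
      refine Finset.sum_congr rfl (fun j _ => ?_)
      ring
  rw [hexp]
  have hgauss : 2 * (∑ j ∈ Finset.Icc 1 m, j) = m * (m + 1) := by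
    induction m with
    | zero => simp
    | succ k ihk =>
      rw [Finset.sum_Icc_succ_top (by omega)]
      ring_nf
      ring_nf at ihk
      omega
  have hdiv : d * m * (m + 1) / 2 = d * (∑ j ∈ Finset.Icc 1 m, j) := by
    have h : d * m * (m + 1) = 2 * (d * (∑ j ∈ Finset.Icc 1 m, j)) := by
      rw [show 2 * (d * (∑ j ∈ Finset.Icc 1 m, j)) = d * (2 * (∑ j ∈ Finset.Icc 1 m, j)) by ring, hgauss]
      ring
    rw [h, Nat.mul_div_cancel_left _ (by norm_num)]
  rw [hdiv]
  push_cast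
  ring

-- the main equality
lemma A_eq_B (rows cols : Int) : DNT2 rows cols = DNT2_alt rows cols := by
  rw [A_sum, B_sum]
  set P := (rows - 1).toNat with hPdef
  set Q := (cols - 1).toNat with hQdef
  set N := (min rows cols - 2).toNat with hNdef
  -- step 1: expand each gcd through the totients of the common divisors
  have step1 : ∀ a ∈ Finset.range P, ∀ b ∈ Finset.range Q,
      2 * ((Nat.gcd (b + 1) (a + 1) : Int) - 1) * (rows - (a : Int) - 1) * (cols - (b : Int) - 1)
      = ∑ j ∈ Finset.range N, 2 * (Nat.totient (j + 2) : Int)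
          * (if (j + 2) ∣ (a + 1) then (rows - (a : Int) - 1) else 0)
          * (if (j + 2) ∣ (b + 1) then (cols - (b : Int) - 1) else 0) := by
    intro a ha b hb
    have haP : a < P := Finset.mem_range.mp ha
    have hbQ : b < Q := Finset.mem_range.mp hb
    have hrows2 : 2 ≤ rows := by omega
    have hcols2 : 2 ≤ cols := by omega
    have hgb : Nat.gcd (b + 1) (a + 1) ≤ N + 1 := by
      have h1 : Nat.gcd (b + 1) (a + 1) ≤ b + 1 := Nat.gcd_le_left _ (by omega)
      have h2 : Nat.gcd (b + 1) (a + 1) ≤ a + 1 := Nat.gcd_le_right _ (by omega)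
      omega
    rw [gcd_sub_one_eq (b + 1) (a + 1) N (by omega) hgb]
    rw [Finset.mul_sum, Finset.sum_mul, Finset.sum_mul]
    refine Finset.sum_congr rfl (fun j _ => ?_)
    split_ifs with hc h1 h2 <;> first | (exfalso; tauto) | ring
  rw [Finset.sum_congr rfl (fun a ha => Finset.sum_congr rfl (fun b hb => step1 a ha b hb))]
  -- step 2: move the divisor sum outside
  rw [Finset.sum_congr rfl (fun a _ => Finset.sum_comm), Finset.sum_comm]
  -- step 3: factor each divisor's term into the two weighted sums and close with their closed forms
  refine Finset.sum_congr rfl (fun j hj => ?_)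
  have hjN : j < N := Finset.mem_range.mp hj
  have hrows3 : 3 ≤ rows := by omega
  have hcols3 : 3 ≤ cols := by omega
  have hsplit : ∀ a : ℕ,
      ∑ b ∈ Finset.range Q, 2 * (Nat.totient (j + 2) : Int)
          * (if (j + 2) ∣ (a + 1) then (rows - (a : Int) - 1) else 0)
          * (if (j + 2) ∣ (b + 1) then (cols - (b : Int) - 1) else 0)
      = (2 * (Nat.totient (j + 2) : Int) * (if (j + 2) ∣ (a + 1) then (rows - (a : Int) - 1) else 0))
          * ∑ b ∈ Finset.range Q, (if (j + 2) ∣ (b + 1) then (cols - (b : Int) - 1) else 0) := by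
    intro a
    rw [Finset.mul_sum]
  rw [Finset.sum_congr rfl (fun a _ => hsplit a), ← Finset.sum_mul, ← Finset.mul_sum]
  have hwA := wsum_eq rows P (j + 2) (by omega) (by omega)
  have hwB := wsum_eq cols Q (j + 2) (by omega) (by omega)
  have hphi := phiB_eq (j + 2) (by omega)
  have hcastd : (2 : Int) + (j : Int) = ((j + 2 : ℕ) : Int) := by push_cast; ring
  rw [hcastd, hphi, ← hwA, ← hwB]
  ring

-- ===== VERDICT (by name: the statement is the Claim_ definition above) =====
theorem DNT2_spec : Claim_equal_DNT2 := by
  intro rows cols _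
  unfold Spec_DNT2
  exact A_eq_B rows cols
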